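-- pv_equiv track=rewrite | github.com/stef-k/CogniRelay | app/ui/router.py | _latest_continuity_change
-- ===== SOURCE A (Python) =====
-- from typing import Any, Literal
--
-- def _latest_continuity_change(rows: list[dict[str, Any]]) -> dict[str, str] | None:
--     """Return the latest lifecycle change visible in the current continuity scope."""
--     latest_row: dict[str, Any] | None = None
--     latest_sort_key: tuple[str, str, str, str] | None = None
--     for row in rows:
--         recorded_at = _display_recorded_at(row)
--         sort_key = (
--             recorded_at,
--             str(row.get("subject_kind") or ""),
--             str(row.get("subject_id") or ""),
--             str(row.get("artifact_state") or ""),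
--         )
--         if latest_sort_key is None or sort_key > latest_sort_key:
--             latest_sort_key = sort_key
--             latest_row = row
--     if latest_row is None:
--         return None
--     return {
--         "subject_kind": str(latest_row.get("subject_kind") or ""),
--         "subject_id": str(latest_row.get("subject_id") or ""),
--         "artifact_state": str(latest_row.get("artifact_state") or ""),
--         "recorded_at": _display_recorded_at(latest_row),
--     }
--
-- def _display_recorded_at(row: dict[str, Any]) -> str:
--     """Return the best lifecycle timestamp to show for one row."""
--     state = str(row.get("artifact_state") or "")
--     if state == "cold":
--         return str(row.get("cold_stored_at") or row.get("archived_at") or "n/a")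
--     if state == "archived":
--         return str(row.get("archived_at") or row.get("updated_at") or "n/a")
--     return str(row.get("updated_at") or "n/a")
-- ===== SOURCE B (Python) =====
-- def _display_recorded_at(row):
--     """Return the best lifecycle timestamp to show for one row."""
--     state = str(row.get("artifact_state") or "")
--     if state == "cold":
--         return str(row.get("cold_stored_at") or row.get("archived_at") or "n/a")
--     if state == "archived":
--         return str(row.get("archived_at") or row.get("updated_at") or "n/a")
--     return str(row.get("updated_at") or "n/a")
--
--
-- def _latest_continuity_change(rows):
--     if not rows:
--         return None
--     latest_row = sorted(
--         rows,
--         key=lambda row: (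
--             _display_recorded_at(row),
--             str(row.get("subject_kind") or ""),
--             str(row.get("subject_id") or ""),
--             str(row.get("artifact_state") or ""),
--         ),
--     )[-1]
--     return {
--         "subject_kind": str(latest_row.get("subject_kind") or ""),
--         "subject_id": str(latest_row.get("subject_id") or ""),
--         "artifact_state": str(latest_row.get("artifact_state") or ""),
--         "recorded_at": _display_recorded_at(latest_row),
--     }
-- ===== Notes on version B (the rewrite author's own statement) =====
-- stated objective: alternative
-- what changed: B replaces A's single-pass running-maximum loop with a staged strategy: sort the whole list ascending by the 4-tuple key and take the last element; ties are harmless because the output dict is fully determined by the key fields.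
import Mathlib
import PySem

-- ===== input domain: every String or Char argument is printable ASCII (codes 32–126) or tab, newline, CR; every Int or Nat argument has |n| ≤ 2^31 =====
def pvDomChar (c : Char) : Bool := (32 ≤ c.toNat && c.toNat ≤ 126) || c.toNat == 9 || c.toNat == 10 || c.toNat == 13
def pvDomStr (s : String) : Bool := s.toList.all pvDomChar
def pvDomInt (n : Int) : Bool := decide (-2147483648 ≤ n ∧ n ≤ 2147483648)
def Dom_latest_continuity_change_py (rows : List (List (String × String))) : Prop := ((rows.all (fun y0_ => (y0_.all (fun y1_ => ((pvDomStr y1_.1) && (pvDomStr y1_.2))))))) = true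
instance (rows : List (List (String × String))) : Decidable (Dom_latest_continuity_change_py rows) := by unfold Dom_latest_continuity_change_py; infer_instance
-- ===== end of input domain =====

-- B sorts the whole list ascending by the 4-tuple key and takes the last row, instead of A's single-pass running maximum; same output (ties share all output fields), alternative structure.
-- Shared module primitives (dict lookup, truthiness, and the shared helper _display_recorded_at):
-- row.get(k): first match in the association list (dict lookup).
def pvGet (row : List (String × String)) (k : String) : Option String :=
  match row with
  | [] => none
  | (k', v) :: rest => if k' = k then some v else pvGet rest k

-- Python `x or d` for x : Optional[str] (falsy = None or ""); str() on a str is the identity.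
def pvOr (o : Option String) (d : String) : String :=
  match o with
  | some s => if s = "" then d else s
  | none => d

-- Python's strict `<` on equal-shape 4-tuples of str (String < is code-point lexicographic, exact on ASCII).
def lexLt (a b : String × String × String × String) : Bool :=
  decide (a.1 < b.1) ||
    (a.1 = b.1 && (decide (a.2.1 < b.2.1) ||
      (a.2.1 = b.2.1 && (decide (a.2.2.1 < b.2.2.1) ||
        (a.2.2.1 = b.2.2.1 && decide (a.2.2.2 < b.2.2.2))))))

-- the same-module helper _display_recorded_at, used by BOTH versions:
def displayRecordedAt (row : List (String × String)) : String :=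
  if pvOr (pvGet row "artifact_state") "" = "cold" then pvOr (pvGet row "cold_stored_at") (pvOr (pvGet row "archived_at") "n/a")
  else if pvOr (pvGet row "artifact_state") "" = "archived" then pvOr (pvGet row "archived_at") (pvOr (pvGet row "updated_at") "n/a")
  else pvOr (pvGet row "updated_at") "n/a"

-- ===== PORT A =====
-- the sort_key tuple A computes for each row
def sortKeyA (row : List (String × String)) : String × String × String × String :=
  (displayRecordedAt row,
   pvOr (pvGet row "subject_kind") "",
   pvOr (pvGet row "subject_id") "",
   pvOr (pvGet row "artifact_state") "")

-- one iteration of A's loop: state = (latest_row, latest_sort_key)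
def stepA (acc : Option (List (String × String)) × Option (String × String × String × String))
    (row : List (String × String)) :
    Option (List (String × String)) × Option (String × String × String × String) :=
  let key := sortKeyA row
  match acc.2 with
  | none => (some row, some key)
  | some lk => if lexLt lk key then (some row, some key) else acc

def latest_continuity_change_py (rows : List (List (String × String))) : Option (List (String × String)) :=
  let st := rows.foldl stepA (none, none)
  match st.1 with
  | none => none
  | some lr =>
      some [("subject_kind", pvOr (pvGet lr "subject_kind") ""),
            ("subject_id", pvOr (pvGet lr "subject_id") ""),
            ("artifact_state", pvOr (pvGet lr "artifact_state") ""),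
            ("recorded_at", displayRecordedAt lr)]

-- ===== PORT B =====
-- Source B's key lambda: the same 4-tuple, via the shared helper
def sortKeyB (row : List (String × String)) : String × String × String × String :=
  (displayRecordedAt row,
   pvOr (pvGet row "subject_kind") "",
   pvOr (pvGet row "subject_id") "",
   pvOr (pvGet row "artifact_state") "")

-- sorted(rows, key=…) with a TUPLE key: Python's stable ascending sort is exactly this
-- insertBy fold (PySem.List.sorted_eq_foldl_insertBy); the tuple `<` is written out as lexLt
-- because Lean's product `<` is pointwise, not lexicographic.
def latest_continuity_change_py_alt (rows : List (List (String × String))) : Option (List (String × String)) :=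
  match rows with
  | [] => none
  | _ :: _ =>
      let sortedRows := rows.foldl
        (fun acc row => PySem.List.insertBy (fun a b => lexLt (sortKeyB a) (sortKeyB b)) row acc) []
      match sortedRows.getLast? with   -- [-1] on the sorted list; sortedRows is nonempty here
      | none => none
      | some lr =>
          some [("subject_kind", pvOr (pvGet lr "subject_kind") ""),
                ("subject_id", pvOr (pvGet lr "subject_id") ""),
                ("artifact_state", pvOr (pvGet lr "artifact_state") ""),
                ("recorded_at", displayRecordedAt lr)]

-- ===== PRECONDITION & SPEC =====
def Spec_latest_continuity_change_py (rows : List (List (String × String))) (out : Option (List (String × String))) : Prop := out = latest_continuity_change_py_alt rows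
instance (rows : List (List (String × String))) (out : Option (List (String × String))) : Decidable (Spec_latest_continuity_change_py rows out) := by unfold Spec_latest_continuity_change_py; infer_instance

-- ===== CLAIM =====
def Claim_equal_latest_continuity_change_py : Prop := ∀ (rows : List (List (String × String))), Dom_latest_continuity_change_py rows → Spec_latest_continuity_change_py rows (latest_continuity_change_py rows)

-- ===== LEMMAS AND PROOFS =====

theorem lexLt_irrefl (a : String × String × String × String) : lexLt a a = false := by
  simp [lexLt]

theorem lexLt_trans {a b c : String × String × String × String}
    (h1 : lexLt a b = true) (h2 : lexLt b c = true) : lexLt a c = true := by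
  simp only [lexLt, Bool.or_eq_true, Bool.and_eq_true, decide_eq_true_eq] at *
  rcases h1 with h1 | ⟨e1, h1⟩
  · rcases h2 with h2 | ⟨e2, h2⟩
    · exact Or.inl (lt_trans h1 h2)
    · exact Or.inl (e2 ▸ h1)
  · rcases h2 with h2 | ⟨e2, h2⟩
    · exact Or.inl (e1 ▸ h2)
    · refine Or.inr ⟨e1.trans e2, ?_⟩
      rcases h1 with h1 | ⟨f1, h1⟩
      · rcases h2 with h2 | ⟨f2, h2⟩
        · exact Or.inl (lt_trans h1 h2)
        · exact Or.inl (f2 ▸ h1)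
      · rcases h2 with h2 | ⟨f2, h2⟩
        · exact Or.inl (f1 ▸ h2)
        · refine Or.inr ⟨f1.trans f2, ?_⟩
          rcases h1 with h1 | ⟨g1, h1⟩
          · rcases h2 with h2 | ⟨g2, h2⟩
            · exact Or.inl (lt_trans h1 h2)
            · exact Or.inl (g2 ▸ h1)
          · rcases h2 with h2 | ⟨g2, h2⟩
            · exact Or.inl (g1 ▸ h2)
            · exact Or.inr ⟨g1.trans g2, lt_trans h1 h2⟩

-- if neither strictly precedes the other, the keys are equal
theorem lexLt_conn {a b : String × String × String × String}
    (h1 : lexLt a b = false) (h2 : lexLt b a = false) : a = b := by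
  simp only [lexLt, Bool.or_eq_false_iff, Bool.and_eq_false_iff, decide_eq_false_iff_not] at *
  obtain ⟨n1, m1⟩ := h1
  obtain ⟨n2, m2⟩ := h2
  have e1 : a.1 = b.1 := le_antisymm (not_lt.mp n2) (not_lt.mp n1)
  rcases m1 with m1 | m1; · exact absurd e1 m1
  rcases m2 with m2 | m2; · exact absurd e1.symm m2
  obtain ⟨p1, q1⟩ := m1
  obtain ⟨p2, q2⟩ := m2
  have e2 : a.2.1 = b.2.1 := le_antisymm (not_lt.mp p2) (not_lt.mp p1)
  rcases q1 with q1 | q1; · exact absurd e2 q1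
  rcases q2 with q2 | q2; · exact absurd e2.symm q2
  obtain ⟨r1, s1⟩ := q1
  obtain ⟨r2, s2⟩ := q2
  have e3 : a.2.2.1 = b.2.2.1 := le_antisymm (not_lt.mp r2) (not_lt.mp r1)
  rcases s1 with s1 | s1; · exact absurd e3 s1
  rcases s2 with s2 | s2; · exact absurd e3.symm s2
  have e4 : a.2.2.2 = b.2.2.2 := le_antisymm (not_lt.mp s2) (not_lt.mp s1)
  obtain ⟨a1, a2, a3, a4⟩ := a
  obtain ⟨b1, b2, b3, b4⟩ := b
  simp_all

theorem getLast?_cons_ne {α : Type} (a : α) (l : List α) (h : l ≠ []) :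
    (a :: l).getLast? = l.getLast? := by
  cases l with
  | nil => exact absurd rfl h
  | cons b t => exact List.getLast?_cons_cons ..

-- inserting an element that precedes SOME element of s leaves the last element of s in place
theorem insertBy_getLast?_of_before {α : Type} (before : α → α → Bool) (x : α) (s : List α)
    (h : ∃ y ∈ s, before x y = true) :
    (PySem.List.insertBy before x s).getLast? = s.getLast? := by
  induction s with
  | nil => simp at h
  | cons z t ih =>
      by_cases hz : before x z = true
      · simp [PySem.List.insertBy, hz, List.getLast?_cons_cons]
      · obtain ⟨y, hy, hby⟩ := h
        rcases List.mem_cons.mp hy with hy | hy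
        · exact absurd (hy ▸ hby) hz
        have hz' : before x z = false := by cases h : before x z <;> simp_all
        have ht : t ≠ [] := by rintro rfl; simp at hy
        have hins : PySem.List.insertBy before x t ≠ [] := by
          have := (PySem.List.mem_insertBy before x x t).mpr (Or.inl rfl)
          intro he; rw [he] at this; simp at this
        rw [show PySem.List.insertBy before x (z :: t) = z :: PySem.List.insertBy before x t from by
          simp [PySem.List.insertBy, hz']]
        rw [getLast?_cons_ne _ _ hins, getLast?_cons_ne _ _ ht]
        exact ih ⟨y, hy, hby⟩

-- invariant of B's insertion fold: the accumulator's last element carries the running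
-- lexLt-maximum of the keys seen (replacing only on strict <, exactly A's rule)
theorem sortedFold_inv (l : List (List (String × String))) :
    ∀ (acc : List (List (String × String))) (r : List (String × String)),
      acc.getLast? = some r →
      (∀ y ∈ acc, lexLt (sortKeyA r) (sortKeyA y) = false) →
      ∃ r', (l.foldl (fun acc row => PySem.List.insertBy (fun a b => lexLt (sortKeyB a) (sortKeyB b)) row acc) acc).getLast? = some r' ∧
        (∀ y ∈ l.foldl (fun acc row => PySem.List.insertBy (fun a b => lexLt (sortKeyB a) (sortKeyB b)) row acc) acc, lexLt (sortKeyA r') (sortKeyA y) = false) ∧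
        sortKeyA r' = (l.map sortKeyA).foldl (fun a b => if lexLt a b then b else a) (sortKeyA r) := by
  have hBA : sortKeyB = sortKeyA := rfl
  induction l with
  | nil => intro acc r hl hmax; exact ⟨r, hl, hmax, rfl⟩
  | cons x t ih =>
      intro acc r hl hmax
      simp only [List.foldl_cons, List.map_cons, hBA]
      by_cases hx : lexLt (sortKeyA r) (sortKeyA x) = true
      · -- new strict maximum: x precedes no element of acc, so it is appended at the end
        have hnot : ∀ y ∈ acc, lexLt (sortKeyA x) (sortKeyA y) = false := by
          intro y hy
          by_contra hc
          have hc' : lexLt (sortKeyA x) (sortKeyA y) = true := by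
            cases h : lexLt (sortKeyA x) (sortKeyA y) <;> simp_all
          exact absurd (lexLt_trans hx hc') (by simp [hmax y hy])
        rw [PySem.List.insertBy_of_forall_not_before _ _ _ hnot]
        have hl' : (acc ++ [x]).getLast? = some x := List.getLast?_concat
        have hmax' : ∀ y ∈ acc ++ [x], lexLt (sortKeyA x) (sortKeyA y) = false := by
          intro y hy
          rcases List.mem_append.mp hy with hy | hy
          · exact hnot y hy
          · simp at hy; subst hy; exact lexLt_irrefl _
        obtain ⟨r', h1, h2, h3⟩ := ih (acc ++ [x]) x hl' hmax'
        exact ⟨r', h1, h2, by rw [h3, if_pos hx]⟩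
      · have hx' : lexLt (sortKeyA r) (sortKeyA x) = false := by
          cases h : lexLt (sortKeyA r) (sortKeyA x) <;> simp_all
        by_cases hb : ∃ y ∈ acc, lexLt (sortKeyA x) (sortKeyA y) = true
        · -- x is inserted strictly inside: the last element is unchanged
          have hl' : (PySem.List.insertBy (fun a b => lexLt (sortKeyA a) (sortKeyA b)) x acc).getLast? = some r := by
            rw [insertBy_getLast?_of_before _ _ _ hb]; exact hl
          have hmax' : ∀ y ∈ PySem.List.insertBy (fun a b => lexLt (sortKeyA a) (sortKeyA b)) x acc, lexLt (sortKeyA r) (sortKeyA y) = false := by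
            intro y hy
            rcases (PySem.List.mem_insertBy _ _ _ _).mp hy with hy | hy
            · subst hy; exact hx'
            · exact hmax y hy
          obtain ⟨r', h1, h2, h3⟩ := ih _ r hl' hmax'
          exact ⟨r', h1, h2, by rw [h3, if_neg (by simp [hx'])]⟩
        · -- x precedes nothing: appended at the end, but then its key EQUALS the running max
          rw [not_exists] at hb
          simp only [not_and] at hb
          have hnot : ∀ y ∈ acc, lexLt (sortKeyA x) (sortKeyA y) = false := by
            intro y hy
            have := hb y hy
            cases h : lexLt (sortKeyA x) (sortKeyA y) <;> simp_all
          rw [PySem.List.insertBy_of_forall_not_before _ _ _ hnot]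
          have hr : r ∈ acc := List.mem_of_getLast? hl
          have hkeq : sortKeyA r = sortKeyA x := lexLt_conn hx' (hnot r hr)
          have hl' : (acc ++ [x]).getLast? = some x := List.getLast?_concat
          have hmax' : ∀ y ∈ acc ++ [x], lexLt (sortKeyA x) (sortKeyA y) = false := by
            intro y hy
            rcases List.mem_append.mp hy with hy | hy
            · exact hnot y hy
            · simp at hy; subst hy; exact lexLt_irrefl _
          obtain ⟨r', h1, h2, h3⟩ := ih (acc ++ [x]) x hl' hmax'
          exact ⟨r', h1, h2, by rw [h3, ← hkeq]; simp [lexLt_irrefl]⟩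

-- A's loop, seeded with a first row, tracks the same running maximum (key of stored row)
theorem loopA (l : List (List (String × String))) :
    ∀ r, ∃ r', l.foldl stepA (some r, some (sortKeyA r)) = (some r', some (sortKeyA r')) ∧
      sortKeyA r' = (l.map sortKeyA).foldl (fun a b => if lexLt a b then b else a) (sortKeyA r) := by
  induction l with
  | nil => intro r; exact ⟨r, rfl, rfl⟩
  | cons x t ih =>
      intro r
      simp only [List.foldl_cons, List.map_cons, stepA]
      by_cases h : lexLt (sortKeyA r) (sortKeyA x) = true
      · simpa [h] using ih x
      · simpa [h] using ih r

-- the output dict is a function of the sort key alone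
def outOfKey (k : String × String × String × String) : List (String × String) :=
  [("subject_kind", k.2.1), ("subject_id", k.2.2.1), ("artifact_state", k.2.2.2), ("recorded_at", k.1)]

theorem out_eq (lr : List (String × String)) :
    [(("subject_kind" : String), pvOr (pvGet lr "subject_kind") ""),
     ("subject_id", pvOr (pvGet lr "subject_id") ""),
     ("artifact_state", pvOr (pvGet lr "artifact_state") ""),
     ("recorded_at", displayRecordedAt lr)] = outOfKey (sortKeyA lr) := rfl

theorem latest_continuity_change_py_eq_alt (rows : List (List (String × String))) :
    latest_continuity_change_py rows = latest_continuity_change_py_alt rows := by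
  cases rows with
  | nil => rfl
  | cons r rest =>
      unfold latest_continuity_change_py latest_continuity_change_py_alt
      obtain ⟨rA, hfoldA, hkeyA⟩ := loopA rest r
      have hstart : (PySem.List.insertBy (fun a b => lexLt (sortKeyB a) (sortKeyB b)) r []).getLast? = some r := rfl
      obtain ⟨rB, h1, _, h3⟩ := sortedFold_inv rest [r] r hstart (by
        intro y hy; simp at hy; subst hy; exact lexLt_irrefl _)
      simp only [List.foldl_cons, stepA, hfoldA]
      have : (rest.foldl (fun acc row => PySem.List.insertBy (fun a b => lexLt (sortKeyB a) (sortKeyB b)) row acc)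
          (PySem.List.insertBy (fun a b => lexLt (sortKeyB a) (sortKeyB b)) r [])) =
          (rest.foldl (fun acc row => PySem.List.insertBy (fun a b => lexLt (sortKeyB a) (sortKeyB b)) row acc) [r]) := rfl
      rw [this, h1]
      simp only [out_eq]
      rw [hkeyA, h3]

-- ===== VERDICT =====
theorem latest_continuity_change_py_spec : Claim_equal_latest_continuity_change_py := by
  intro rows _
  unfold Spec_latest_continuity_change_py
  exact latest_continuity_change_py_eq_alt rows
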